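-- pv_equiv track=rewrite | github.com/luchev/interview-preparation | leetcode/152. Maximum Product Subarray/1.py | first_and_last_negative_index
-- ===== SOURCE A (Python) =====
-- from typing import List
--
-- def first_and_last_negative_index(nums: List[int]) -> (int, int):
--     first_index = -1
--     for i in range(len(nums)):
--         if nums[i] < 0:
--             first_index = i
--             break
--     last_index = -1
--     for i in reversed(range(len(nums))):
--         if nums[i] < 0:
--             last_index = i
--             break
--     return (first_index, last_index)
-- ===== SOURCE B (Python) =====
-- from typing import List
--
-- def first_and_last_negative_index(nums: List[int]) -> (int, int):
--     negs = [i for i, x in enumerate(nums) if x < 0]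
--     if not negs:
--         return (-1, -1)
--     return (negs[0], negs[-1])
-- ===== Notes on version B (the rewrite author's own statement) =====
-- stated objective: simpler
-- what changed: Replaces the two opposite-direction early-exit index scans with one comprehension collecting all negative indices, then takes its first and last element.
import Mathlib
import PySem

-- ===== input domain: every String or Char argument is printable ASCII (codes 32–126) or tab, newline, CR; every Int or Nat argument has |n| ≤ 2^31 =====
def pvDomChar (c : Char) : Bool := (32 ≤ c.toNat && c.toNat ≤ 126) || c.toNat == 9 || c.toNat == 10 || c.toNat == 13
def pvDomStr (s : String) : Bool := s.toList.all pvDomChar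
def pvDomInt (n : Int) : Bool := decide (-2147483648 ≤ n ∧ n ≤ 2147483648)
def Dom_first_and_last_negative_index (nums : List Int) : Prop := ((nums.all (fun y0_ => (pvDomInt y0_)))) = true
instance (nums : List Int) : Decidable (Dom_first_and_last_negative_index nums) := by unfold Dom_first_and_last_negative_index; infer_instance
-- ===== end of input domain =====

-- B replaces A's two opposite-direction early-exit scans by one comprehension of all
-- negative indices, then takes its first and last element (objective: simpler).

-- ===== PORT A =====
-- A's first loop: scan forward with index i, break at the first nums[i] < 0, else -1.
def pvFirstScan : List Int → Int → Int
  | [], _ => -1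
  | x :: xs, i => if x < 0 then i else pvFirstScan xs (i + 1)

-- A's second loop: scan reversed(range(len(nums))) with decreasing index, break at the
-- first (i.e. rightmost) nums[i] < 0, else -1; applied to nums.reverse below.
def pvLastScan : List Int → Int → Int
  | [], _ => -1
  | x :: xs, i => if x < 0 then i else pvLastScan xs (i - 1)

def first_and_last_negative_index (nums : List Int) : Int × Int :=
  (pvFirstScan nums 0, pvLastScan nums.reverse ((nums.length : Int) - 1))

-- ===== PORT B =====
def first_and_last_negative_index_alt (nums : List Int) : Int × Int :=
  let negs := ((PySem.List.enumerate nums 0).filter (fun p => p.2 < 0)).map (fun p => p.1)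
  match negs with
  | [] => (-1, -1)
  | h :: t => (h, (h :: t).getLast (by simp))

-- ===== PRECONDITION & SPEC =====
def Spec_first_and_last_negative_index (nums : List Int) (out : Int × Int) : Prop := out = first_and_last_negative_index_alt nums
instance (nums : List Int) (out : Int × Int) : Decidable (Spec_first_and_last_negative_index nums out) := by unfold Spec_first_and_last_negative_index; infer_instance

-- ===== CLAIM (what is proved, stated in full; the proofs are below) =====
def Claim_equal_first_and_last_negative_index : Prop := ∀ (nums : List Int), Dom_first_and_last_negative_index nums → Spec_first_and_last_negative_index nums (first_and_last_negative_index nums)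

-- ===== LEMMAS AND PROOFS =====

-- ascending list of indices (offset s) of negative entries
def pvNegs : List Int → Int → List Int
  | [], _ => []
  | x :: xs, s => if x < 0 then s :: pvNegs xs (s + 1) else pvNegs xs (s + 1)

-- descending-index analogue, for the reversed scan
def pvDescNegs : List Int → Int → List Int
  | [], _ => []
  | x :: xs, s => if x < 0 then s :: pvDescNegs xs (s - 1) else pvDescNegs xs (s - 1)

theorem pvFirstScan_eq (xs : List Int) (s : Int) :
    pvFirstScan xs s = (pvNegs xs s).headD (-1) := by
  induction xs generalizing s with
  | nil => rfl
  | cons x xs ih => simp [pvFirstScan, pvNegs]; split_ifs <;> simp [ih]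

theorem pvLastScan_eq (ys : List Int) (s : Int) :
    pvLastScan ys s = (pvDescNegs ys s).headD (-1) := by
  induction ys generalizing s with
  | nil => rfl
  | cons y ys ih => simp [pvLastScan, pvDescNegs]; split_ifs <;> simp [ih]

theorem pvDescNegs_append (as bs : List Int) (s : Int) :
    pvDescNegs (as ++ bs) s = pvDescNegs as s ++ pvDescNegs bs (s - as.length) := by
  induction as generalizing s with
  | nil => simp [pvDescNegs]
  | cons a as ih =>
      simp only [List.cons_append, pvDescNegs, ih, List.length_cons]
      split_ifs <;> simp <;> ring_nf

theorem pvDescNegs_reverse (xs : List Int) (s : Int) :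
    pvDescNegs xs.reverse (s + xs.length - 1) = (pvNegs xs s).reverse := by
  induction xs generalizing s with
  | nil => rfl
  | cons x xs ih =>
      have h1 : (x :: xs).reverse = xs.reverse ++ [x] := by simp
      rw [h1, pvDescNegs_append]
      have e1 : (s + ((x :: xs).length : Int) - 1) = (s + 1) + xs.length - 1 := by
        simp; ring
      rw [e1, ih]
      have e2 : ((s + 1) + (xs.length : Int) - 1) - xs.reverse.length = s := by
        simp; ring
      rw [e2]
      simp [pvNegs, pvDescNegs]
      split_ifs <;> simp

theorem pvNegs_eq_filter (xs : List Int) (s : Int) :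
    pvNegs xs s = ((PySem.List.enumerate xs s).filter (fun p => p.2 < 0)).map (fun p => p.1) := by
  induction xs generalizing s with
  | nil => simp [pvNegs, PySem.List.enumerate_nil]
  | cons x xs ih =>
      by_cases h : x < 0 <;>
        simp [pvNegs, PySem.List.enumerate_cons, h, ih]

theorem pvRevHeadD (l : List Int) (h : l ≠ []) : l.reverse.headD (-1) = l.getLast h := by
  rw [List.headD_eq_head?_getD, List.head?_reverse, List.getLast?_eq_some_getLast h]
  rfl

-- ===== VERDICT (by name: the statement is the Claim_ definition above) =====
theorem first_and_last_negative_index_spec : Claim_equal_first_and_last_negative_index := by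
  intro nums _
  unfold Spec_first_and_last_negative_index first_and_last_negative_index
    first_and_last_negative_index_alt
  rw [pvFirstScan_eq]
  have hl : ((nums.length : Int) - 1) = 0 + nums.length - 1 := by ring
  rw [hl, pvLastScan_eq, pvDescNegs_reverse, ← pvNegs_eq_filter]
  cases h : pvNegs nums 0 with
  | nil => simp
  | cons a t =>
      simp only [List.headD_cons]
      rw [pvRevHeadD (a :: t) (by simp)]
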